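-- pv_equiv track=rewrite | github.com/Ahmadfauzi34/Gg | Sel 8 .py | _extract_qtype
-- ===== SOURCE A (Python) =====
-- def _extract_qtype(question: str) -> str:
--     q_lower = question.lower().strip()
--     mapping = {
--         'siapa': 'agen', 'apa': 'pasien', 'di mana': 'lokasi', 'kapan': 'waktu',
--         'mengapa': 'sumber', 'bagaimana': 'atribut', 'dengan apa': 'instrumen',
--         'kenapa': 'sumber', 'siapakah': 'agen', 'apakah': 'verify'
--     }
--     for prefix, qtype in sorted(mapping.items(), key=lambda x: -len(x[0])):
--         if q_lower.startswith(prefix):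
--             return qtype
--     return 'unknown'
-- ===== SOURCE B (Python) =====
-- def _extract_qtype(question: str) -> str:
--     q_lower = question.lower().strip()
--     mapping = {
--         'siapa': 'agen', 'apa': 'pasien', 'di mana': 'lokasi', 'kapan': 'waktu',
--         'mengapa': 'sumber', 'bagaimana': 'atribut', 'dengan apa': 'instrumen',
--         'kenapa': 'sumber', 'siapakah': 'agen', 'apakah': 'verify'
--     }
--     matches = [(len(p), t) for p, t in mapping.items() if q_lower.startswith(p)]
--     if not matches:
--         return 'unknown'
--     return max(matches, key=lambda m: m[0])[1]
-- ===== Notes on version B (the rewrite author's own statement) =====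
-- stated objective: simpler
-- what changed: B drops A's descending-length sort and early-return scan: it filters the mapping once for matching prefixes and returns the qtype of the longest match (max by prefix length), or the fallback answer if none match.
import Mathlib
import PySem

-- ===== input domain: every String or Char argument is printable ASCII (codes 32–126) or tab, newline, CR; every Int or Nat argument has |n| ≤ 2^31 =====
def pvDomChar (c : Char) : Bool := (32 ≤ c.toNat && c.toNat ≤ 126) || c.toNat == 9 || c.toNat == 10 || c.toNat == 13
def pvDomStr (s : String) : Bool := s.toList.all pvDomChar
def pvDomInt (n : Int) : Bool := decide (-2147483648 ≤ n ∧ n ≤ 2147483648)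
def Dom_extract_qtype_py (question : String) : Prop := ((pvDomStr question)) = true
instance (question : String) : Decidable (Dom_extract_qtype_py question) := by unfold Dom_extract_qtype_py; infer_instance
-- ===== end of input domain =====

-- B replaces A's sort-then-first-startswith-hit by a single filter over the mapping plus
-- max-by-prefix-length (objective: simpler — no sort, no early-return control flow).

-- ===== PORT A =====
-- the dict literal shared by both Pythons (insertion order)
def pvMapping : List (String × String) :=
  [("siapa", "agen"), ("apa", "pasien"), ("di mana", "lokasi"), ("kapan", "waktu"),
   ("mengapa", "sumber"), ("bagaimana", "atribut"), ("dengan apa", "instrumen"),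
   ("kenapa", "sumber"), ("siapakah", "agen"), ("apakah", "verify")]

-- A's for-loop with early return
def pvALoop (ql : String) : List (String × String) → String
  | [] => "unknown"
  | (p, t) :: rest => if PySem.Str.startswith ql p then t else pvALoop ql rest

def extract_qtype_py (question : String) : String :=
  let q_lower := PySem.Str.strip (PySem.Str.lower question)
  pvALoop q_lower (PySem.List.sorted pvMapping (fun x => -(PySem.Str.len x.1 : Int)) false)

-- ===== PORT B =====
def extract_qtype_py_alt (question : String) : String :=
  let q_lower := PySem.Str.strip (PySem.Str.lower question)
  let ms := (pvMapping.filter (fun pt => PySem.Str.startswith q_lower pt.1)).map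
      (fun pt => ((PySem.Str.len pt.1 : Int), pt.2))
  match PySem.List.max? ms (fun m => m.1) with
  | none => "unknown"
  | some m => m.2

-- ===== PRECONDITION & SPEC =====
def Spec_extract_qtype_py (question : String) (out : String) : Prop := out = extract_qtype_py_alt question
instance (question : String) (out : String) : Decidable (Spec_extract_qtype_py question out) := by unfold Spec_extract_qtype_py; infer_instance

-- ===== CLAIM (what is proved, stated in full; the proofs are below) =====
def Claim_equal_extract_qtype_py : Prop := ∀ (question : String), Dom_extract_qtype_py question → Spec_extract_qtype_py question (extract_qtype_py question)

-- ===== LEMMAS AND PROOFS =====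

-- A's sorted(mapping.items(), key=-len): the concrete descending-length (stable) order
theorem pvSorted_eval :
    PySem.List.sorted pvMapping (fun x => -(PySem.Str.len x.1 : Int)) false =
      [("dengan apa", "instrumen"), ("bagaimana", "atribut"), ("siapakah", "agen"),
       ("di mana", "lokasi"), ("mengapa", "sumber"), ("kenapa", "sumber"),
       ("apakah", "verify"), ("siapa", "agen"), ("kapan", "waktu"), ("apa", "pasien")] := by
  decide

-- ===== VERDICT (by name: the statement is the Claim_ definition above) =====
theorem extract_qtype_py_spec : Claim_equal_extract_qtype_py := by
  intro question _
  unfold Spec_extract_qtype_py extract_qtype_py extract_qtype_py_alt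
  rw [pvSorted_eval]
  generalize PySem.Str.strip (PySem.Str.lower question) = ql
  simp only [pvMapping, pvALoop, List.filter_cons, List.filter_nil]
  generalize PySem.Str.startswith ql "dengan apa" = b1
  generalize PySem.Str.startswith ql "bagaimana" = b2
  generalize PySem.Str.startswith ql "siapakah" = b3
  generalize PySem.Str.startswith ql "di mana" = b4
  generalize PySem.Str.startswith ql "mengapa" = b5
  generalize PySem.Str.startswith ql "kenapa" = b6
  generalize PySem.Str.startswith ql "apakah" = b7
  generalize PySem.Str.startswith ql "siapa" = b8
  generalize PySem.Str.startswith ql "kapan" = b9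
  generalize PySem.Str.startswith ql "apa" = b10
  revert b1 b2 b3 b4 b5 b6 b7 b8 b9 b10
  decide
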